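-- pv_equiv track=rewrite | github.com/mezzan/keylogger | obfuscated.py | mMoOOooMOOMmmOm
-- ===== SOURCE A (Python) =====
-- def mMoOOooMOOMmmOm(omOmM):
--     mmMMMM=[]
--     for OMOmoMO in str(omOmM):
--         mmMMMM.append(str(ord(OMOmoMO)))
--     ooOmoMOoo=len(mmMMMM)-1
--     oomMo=0
--     for omoommmmOmOOM in mmMMMM:
--         oomMo+=(10**ooOmoMOoo)*int(chr(int(omoommmmOmOOM)))
--         ooOmoMOoo-=1
--     return oomMo
-- ===== SOURCE B (Python) =====
-- def mMoOOooMOOMmmOm(omOmM):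
--     oomMo = 0
--     for OMOmoMO in str(omOmM):
--         oomMo = oomMo * 10 + int(OMOmoMO)
--     return oomMo
-- ===== Notes on version B (the rewrite author's own statement) =====
-- stated objective: simpler
-- what changed: Replaces A's ord-string round-trip list, precomputed length and decreasing power-of-ten positional weighting with a single Horner pass (shift the accumulator one decimal place and add the next digit) over str(x).
import Mathlib
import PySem

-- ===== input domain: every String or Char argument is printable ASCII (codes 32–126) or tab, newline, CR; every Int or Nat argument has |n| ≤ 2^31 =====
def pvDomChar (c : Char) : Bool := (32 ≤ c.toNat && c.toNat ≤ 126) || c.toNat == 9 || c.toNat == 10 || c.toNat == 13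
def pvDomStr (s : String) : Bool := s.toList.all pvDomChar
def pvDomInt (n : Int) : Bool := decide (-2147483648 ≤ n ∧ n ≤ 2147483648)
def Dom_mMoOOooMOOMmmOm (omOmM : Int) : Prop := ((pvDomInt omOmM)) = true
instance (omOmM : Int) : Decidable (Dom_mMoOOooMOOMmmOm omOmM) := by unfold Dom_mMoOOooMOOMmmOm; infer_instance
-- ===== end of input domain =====

-- B replaces A's ord-string round-trip list and decreasing 10**position weighting with a single
-- Horner pass (shift accumulator by one decimal place, add next digit); objective: simpler. Equivalence on Pre_ (0 ≤ omOmM,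
-- where the Python A returns instead of raising ValueError on the '-' character).

-- ===== PORT A =====
-- per character: int(chr(int(str(ord c)))); the .getD 0 marks where Python would raise
-- (a non-digit after the chr round-trip) — excluded by Pre_, which keeps every character a digit.
def mMoOOooMOOMmmOm (omOmM : Int) : Int :=
  let mmMMMM : List String :=
    (PySem.Int.toStr omOmM).toList.map (fun c => PySem.Int.toStr ((c.toNat : Int)))
  -- ooOmoMOoo := len(mmMMMM) - 1, then the loop; exponent st.1 is nonnegative whenever used,
  -- so 10 ^ st.1.toNat is exactly Python's 10 ** ooOmoOoo there
  (mmMMMM.foldl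
    (fun (st : Int × Int) s =>
      let m := (PySem.Int.ofStr? s).getD 0
      let d := (PySem.Int.ofChars? [Char.ofNat m.toNat]).getD 0
      (st.1 - 1, st.2 + 10 ^ st.1.toNat * d))
    (((mmMMMM.length : Int) - 1), 0)).2

-- ===== PORT B =====
def mMoOOooMOOMmmOm_alt (omOmM : Int) : Int :=
  (PySem.Int.toStr omOmM).toList.foldl
    (fun a c => a * 10 + (PySem.Int.ofChars? [c]).getD 0) 0

-- ===== PRECONDITION & SPEC =====
-- Pre_ excludes negative inputs: there str(omOmM) starts with '-' and the Python A raises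
-- ValueError (int('-')); B raises the same way.
def Pre_mMoOOooMOOMmmOm (omOmM : Int) : Prop := 0 ≤ omOmM
instance (omOmM : Int) : Decidable (Pre_mMoOOooMOOMmmOm omOmM) := by unfold Pre_mMoOOooMOOMmmOm; infer_instance
def pvWitness_mMoOOooMOOMmmOm : Int := (7)

def Spec_mMoOOooMOOMmmOm (omOmM : Int) (out : Int) : Prop := out = mMoOOooMOOMmmOm_alt omOmM
instance (omOmM : Int) (out : Int) : Decidable (Spec_mMoOOooMOOMmmOm omOmM out) := by unfold Spec_mMoOOooMOOMmmOm; infer_instance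

-- ===== CLAIM (what is proved, stated in full; the proofs are below) =====
def Claim_equal_mMoOOooMOOMmmOm : Prop := ∀ (omOmM : Int), Dom_mMoOOooMOOMmmOm omOmM → Pre_mMoOOooMOOMmmOm omOmM → Spec_mMoOOooMOOMmmOm omOmM (mMoOOooMOOMmmOm omOmM)

-- ===== LEMMAS AND PROOFS =====

-- the per-character digit value both ports compute
def pvDigB (c : Char) : Int := (PySem.Int.ofChars? [c]).getD 0

-- A's per-character value: int(chr(int(str(ord c))))
def pvDigA (c : Char) : Int :=
  let m := (PySem.Int.ofStr? (PySem.Int.toStr ((c.toNat : Int)))).getD 0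
  (PySem.Int.ofChars? [Char.ofNat m.toNat]).getD 0

-- every character produced by Nat.toDigits 10 is an ASCII decimal digit
lemma pv_toDigitsCore_digits (f : Nat) : ∀ (n : Nat) (acc : List Char),
    (∀ c ∈ acc, 48 ≤ c.toNat ∧ c.toNat ≤ 57) →
    ∀ c ∈ Nat.toDigitsCore 10 f n acc, 48 ≤ c.toNat ∧ c.toNat ≤ 57 := by
  induction f with
  | zero => intro n acc hacc c hc; exact hacc c hc
  | succ f ih =>
    intro n acc hacc c hc
    have hd : 48 ≤ (n % 10).digitChar.toNat ∧ (n % 10).digitChar.toNat ≤ 57 := by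
      have h10 : n % 10 < 10 := Nat.mod_lt _ (by omega)
      interval_cases h : (n % 10) <;> decide
    simp only [Nat.toDigitsCore] at hc
    by_cases h0 : n / 10 = 0
    · simp only [h0, if_true] at hc
      rcases List.mem_cons.mp hc with rfl | hc
      · exact hd
      · exact hacc c hc
    · simp only [h0, if_false] at hc
      refine ih (n / 10) _ ?_ c hc
      intro c' hc'
      rcases List.mem_cons.mp hc' with rfl | hc'
      · exact hd
      · exact hacc c' hc'

lemma pv_toChars_digits (n : Int) (hn : 0 ≤ n) :
    ∀ c ∈ PySem.Int.toChars n, 48 ≤ c.toNat ∧ c.toNat ≤ 57 := by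
  unfold PySem.Int.toChars
  rw [if_neg (by omega)]
  exact pv_toDigitsCore_digits _ _ [] (by intro c hc; simp at hc)

-- on digit characters A's chr/ord round-trip computes exactly B's int(c)
lemma pv_digA_eq_digB (c : Char) (h1 : 48 ≤ c.toNat) (h2 : c.toNat ≤ 57) :
    pvDigA c = pvDigB c := by
  have hc : c = Char.ofNat c.toNat := (Char.ofNat_toNat c).symm
  rw [hc]
  have h : c.toNat = 48 ∨ c.toNat = 49 ∨ c.toNat = 50 ∨ c.toNat = 51 ∨ c.toNat = 52 ∨
      c.toNat = 53 ∨ c.toNat = 54 ∨ c.toNat = 55 ∨ c.toNat = 56 ∨ c.toNat = 57 := by omega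
  rcases h with h | h | h | h | h | h | h | h | h | h <;> rw [h] <;> decide

-- Horner fold: peeling the accumulator out
lemma pv_horner_acc (l : List Int) (a : Int) :
    l.foldl (fun a d => a * 10 + d) a
      = a * 10 ^ l.length + l.foldl (fun a d => a * 10 + d) 0 := by
  induction l generalizing a with
  | nil => simp
  | cons d t ih =>
    simp only [List.foldl_cons, List.length_cons]
    rw [ih (a * 10 + d), ih (0 * 10 + d)]
    ring

-- A's positional fold, started at exponent len-1, equals the Horner value
lemma pv_positional_eq_horner (l : List Int) (a : Int) :
    (l.foldl (fun (st : Int × Int) d => (st.1 - 1, st.2 + 10 ^ st.1.toNat * d))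
      (((l.length : Int) - 1), a)).2
      = a + l.foldl (fun a d => a * 10 + d) 0 := by
  induction l generalizing a with
  | nil => simp
  | cons d t ih =>
    simp only [List.foldl_cons, List.length_cons]
    have he : ((t.length + 1 : Nat) : Int) - 1 - 1 = ((t.length : Nat) : Int) - 1 := by
      push_cast; ring
    have ht : (((t.length + 1 : Nat) : Int) - 1).toNat = t.length := by omega
    rw [he, ih (a + 10 ^ (((t.length + 1 : Nat) : Int) - 1).toNat * d), ht]
    rw [pv_horner_acc t (0 * 10 + d)]
    ring

theorem pv_main (n : Int) (hn : 0 ≤ n) : mMoOOooMOOMmmOm n = mMoOOooMOOMmmOm_alt n := by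
  unfold mMoOOooMOOMmmOm mMoOOooMOOMmmOm_alt
  simp only [PySem.Int.toList_toStr, List.foldl_map, List.length_map]
  set ds := PySem.Int.toChars n with hds
  have hdig := pv_toChars_digits n hn
  have hA : ds.foldl
      (fun (st : Int × Int) c =>
        let m := (PySem.Int.ofStr? (PySem.Int.toStr ((c.toNat : Int)))).getD 0
        let d := (PySem.Int.ofChars? [Char.ofNat m.toNat]).getD 0
        (st.1 - 1, st.2 + 10 ^ st.1.toNat * d))
      (((ds.length : Int) - 1), 0)
      = ds.foldl
      (fun (st : Int × Int) c => (st.1 - 1, st.2 + 10 ^ st.1.toNat * pvDigB c))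
      (((ds.length : Int) - 1), 0) := by
    refine PySem.List.foldl_congr_mem ds _ _ _ ?_
    intro acc c hc
    have := pv_digA_eq_digB c (hdig c hc).1 (hdig c hc).2
    simp only [pvDigA, pvDigB] at this ⊢
    rw [this]
  rw [hA]
  have hmapA : ds.foldl
      (fun (st : Int × Int) c => (st.1 - 1, st.2 + 10 ^ st.1.toNat * pvDigB c))
      (((ds.length : Int) - 1), 0)
      = (ds.map pvDigB).foldl
      (fun (st : Int × Int) d => (st.1 - 1, st.2 + 10 ^ st.1.toNat * d))
      ((((ds.map pvDigB).length : Int) - 1), 0) := by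
    rw [List.foldl_map, List.length_map]
  have hmapB : ds.foldl (fun a c => a * 10 + pvDigB c) 0
      = (ds.map pvDigB).foldl (fun a d => a * 10 + d) 0 := by
    rw [List.foldl_map]
  calc (ds.foldl
      (fun (st : Int × Int) c => (st.1 - 1, st.2 + 10 ^ st.1.toNat * pvDigB c))
      (((ds.length : Int) - 1), 0)).2
      = ((ds.map pvDigB).foldl
          (fun (st : Int × Int) d => (st.1 - 1, st.2 + 10 ^ st.1.toNat * d))
          ((((ds.map pvDigB).length : Int) - 1), 0)).2 := by rw [hmapA]
    _ = 0 + (ds.map pvDigB).foldl (fun a d => a * 10 + d) 0 :=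
        pv_positional_eq_horner _ 0
    _ = ds.foldl (fun a c => a * 10 + pvDigB c) 0 := by rw [hmapB, zero_add]
    _ = ds.foldl (fun a c => a * 10 + (PySem.Int.ofChars? [c]).getD 0) 0 := rfl

-- ===== VERDICT (by name: the statement is the Claim_ definition above) =====
theorem mMoOOooMOOMmmOm_spec : Claim_equal_mMoOOooMOOMmmOm := by
  intro n _ hpre
  unfold Spec_mMoOOooMOOMmmOm
  exact pv_main n hpre
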